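-- pv_equiv track=rewrite | github.com/Tajmaha8849/Hackerrank-Solution- | bytxelproble5.py | Min_pages
-- ===== SOURCE A (Python) =====
-- def Min_pages(n,nb,ns):
-- 	arr1=[]
-- 	arr2=[]
-- 	lstmax=[]
-- 	sum1,sum2=0,0
-- 	for i in range(len(nb)-1):
-- 		arr1.append(nb[i])
-- 		for j in range(len(arr1)):
-- 			sum1+=arr1[j]
-- 		for k in range(i+1,len(nb)):
-- 			arr2.append(nb[k])
-- 		for m in range(len(arr2)):
-- 			sum2=sum2+arr2[m]
-- 		if(sum1>sum2):
-- 			lstmax.append(sum1)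
-- 		else:
-- 			lstmax.append(sum2)
-- 		sum1,sum2=0,0
-- 		arr2=[]
-- 	return min(lstmax)
-- ===== SOURCE B (Python) =====
-- def Min_pages(n, nb, ns):
--     # One pass: running prefix sum + precomputed total; each split costs O(1).
--     total = sum(nb)
--     best = None
--     pref = 0
--     for x in nb[:-1]:
--         pref += x
--         m = max(pref, total - pref)
--         if best is None or m < best:
--             best = m
--     return best
-- ===== Notes on version B (the rewrite author's own statement) =====
-- stated objective: faster
-- what changed: Replaced the nested index loops that rebuild and re-sum the prefix and suffix arrays for every split with a single pass keeping a running prefix sum and the precomputed total, so each split's max(prefix,suffix) costs O(1).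
import Mathlib
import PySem

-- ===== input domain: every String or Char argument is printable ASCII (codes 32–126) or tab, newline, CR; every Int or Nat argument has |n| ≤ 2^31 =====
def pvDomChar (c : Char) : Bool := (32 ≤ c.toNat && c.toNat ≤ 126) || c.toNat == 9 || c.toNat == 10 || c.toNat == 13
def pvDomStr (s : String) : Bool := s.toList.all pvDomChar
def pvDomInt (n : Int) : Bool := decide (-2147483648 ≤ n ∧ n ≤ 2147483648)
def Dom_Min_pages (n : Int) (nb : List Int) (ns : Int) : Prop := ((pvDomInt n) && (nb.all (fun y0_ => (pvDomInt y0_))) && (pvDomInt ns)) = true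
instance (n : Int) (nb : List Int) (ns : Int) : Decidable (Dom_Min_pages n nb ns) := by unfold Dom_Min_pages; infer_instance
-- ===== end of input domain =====

-- B replaces A's quadratic rebuild-and-resum of prefix/suffix arrays per split by one
-- pass with a running prefix sum and the precomputed total (objective: faster).

-- ===== PORT A =====
-- literal transliteration of A: outer loop over range(len(nb)-1) carrying (arr1, lstmax);
-- inner index loops re-sum arr1, rebuild arr2 and sum it; min(lstmax) at the end
def Min_pages (n : Int) (nb : List Int) (ns : Int) : Int :=
  let L := nb.length
  let res := (List.range (L - 1)).foldl
    (fun (st : List Int × List Int) (i : Nat) =>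
      let arr1 := st.1 ++ [nb.getD i 0]
      let sum1 := (List.range arr1.length).foldl (fun s j => s + arr1.getD j 0) 0
      let arr2 := (List.range' (i + 1) (L - (i + 1))).foldl (fun a k => a ++ [nb.getD k 0]) []
      let sum2 := (List.range arr2.length).foldl (fun s m => s + arr2.getD m 0) 0
      (arr1, st.2 ++ [if sum1 > sum2 then sum1 else sum2]))
    ([], [])
  (PySem.List.min? res.2 (fun x => x)).getD 0

-- ===== PORT B =====
-- literal transliteration of Source B: total = sum(nb); one fold over nb[:-1] carrying
-- (best : Option Int, pref); Python's None becomes Option.none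
def Min_pages_alt (n : Int) (nb : List Int) (ns : Int) : Int :=
  let total := nb.foldl (· + ·) 0
  let res := nb.dropLast.foldl
    (fun (st : Option Int × Int) (x : Int) =>
      let pref := st.2 + x
      let m := max pref (total - pref)
      ((match st.1 with
        | none => some m
        | some b => if m < b then some m else some b), pref))
    (none, 0)
  res.1.getD 0

-- ===== PRECONDITION & SPEC =====
-- Pre_ excludes lists with fewer than two elements: there A's min(lstmax) raises
-- ValueError on the empty list (and B returns None, not an int).
def Pre_Min_pages (n : Int) (nb : List Int) (ns : Int) : Prop := 2 ≤ nb.length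
instance (n : Int) (nb : List Int) (ns : Int) : Decidable (Pre_Min_pages n nb ns) := by
  unfold Pre_Min_pages; infer_instance
def pvWitness_Min_pages : Int × List Int × Int := (3, [1, 2, 3], 0)

def Spec_Min_pages (n : Int) (nb : List Int) (ns : Int) (out : Int) : Prop := out = Min_pages_alt n nb ns
instance (n : Int) (nb : List Int) (ns : Int) (out : Int) : Decidable (Spec_Min_pages n nb ns out) := by unfold Spec_Min_pages; infer_instance

-- ===== CLAIM (what is proved, stated in full; the proofs are below) =====
def Claim_equal_Min_pages : Prop := ∀ (n : Int) (nb : List Int) (ns : Int), Dom_Min_pages n nb ns → Pre_Min_pages n nb ns → Spec_Min_pages n nb ns (Min_pages n nb ns)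

-- ===== LEMMAS AND PROOFS =====

-- max(prefix-sum k, suffix-sum k): the value both programs compute for split k
def pvG (nb : List Int) (k : Nat) : Int := max ((nb.take k).sum) ((nb.drop k).sum)

-- the list of per-split values
def pvM (nb : List Int) : List Int := (List.range (nb.length - 1)).map (fun i => pvG nb (i + 1))

lemma pv_foldl_range_getD_sum (xs : List Int) :
    ∀ s0 : Int, (List.range xs.length).foldl (fun s j => s + xs.getD j 0) s0 = s0 + xs.sum := by
  induction xs using List.reverseRecOn with
  | nil => intro s0; simp
  | append_singleton l a ih =>
    intro s0
    have hlen : (l ++ [a]).length = l.length + 1 := by simp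
    rw [hlen, List.range_succ, List.foldl_append]
    have hcong : (List.range l.length).foldl (fun s j => s + (l ++ [a]).getD j 0) s0
        = (List.range l.length).foldl (fun s j => s + l.getD j 0) s0 := by
      apply PySem.List.foldl_congr_mem
      intro s j hj
      have : j < l.length := List.mem_range.mp hj
      simp [List.getElem?_append_left this]
    rw [hcong, ih s0]
    simp [List.getD]
    ring

lemma pv_foldl_append_map {α β : Type} (f : α → β) :
    ∀ (l : List α) (init : List β),
      l.foldl (fun a k => a ++ [f k]) init = init ++ l.map f := by
  intro l
  induction l with
  | nil => intro init; simp
  | cons x t ih => intro init; simp [List.foldl_cons, ih]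

lemma pv_range'_getD_drop (xs : List Int) (a : Nat) (ha : a ≤ xs.length) :
    (List.range' a (xs.length - a)).map (fun k => xs.getD k 0) = xs.drop a := by
  apply List.ext_getElem
  · simp
  · intro i h1 h2
    have hi : i < xs.length - a := by simpa using h1
    have h3 : a + i < xs.length := by omega
    simp [List.getD_eq_getElem?_getD, List.getElem?_eq_getElem h3]

lemma pv_foldl_sum (xs : List Int) : ∀ a : Int, xs.foldl (· + ·) a = a + xs.sum := by
  induction xs with
  | nil => intro a; simp
  | cons x t ih => intro a; simp [List.foldl_cons, ih]; ring

-- A's loop invariant: after m iterations arr1 is the m-prefix and lstmax holds the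
-- per-split values for splits 1..m
lemma pv_A_inv (nb : List Int) : ∀ m, m ≤ nb.length - 1 →
    (List.range m).foldl
      (fun (st : List Int × List Int) (i : Nat) =>
        let arr1 := st.1 ++ [nb.getD i 0]
        let sum1 := (List.range arr1.length).foldl (fun s j => s + arr1.getD j 0) 0
        let arr2 := (List.range' (i + 1) (nb.length - (i + 1))).foldl
          (fun a k => a ++ [nb.getD k 0]) []
        let sum2 := (List.range arr2.length).foldl (fun s m => s + arr2.getD m 0) 0
        (arr1, st.2 ++ [if sum1 > sum2 then sum1 else sum2]))
      ([], [])
    = (nb.take m, (List.range m).map (fun i => pvG nb (i + 1))) := by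
  intro m
  induction m with
  | zero => intro _; simp
  | succ m ih =>
    intro hm
    have hm' : m ≤ nb.length - 1 := by omega
    have hmL : m < nb.length := by omega
    rw [List.range_succ, List.foldl_append, ih hm']
    simp only [List.foldl_cons, List.foldl_nil]
    have harr1 : nb.take m ++ [nb.getD m 0] = nb.take (m + 1) := by
      rw [List.take_add_one, List.getElem?_eq_getElem hmL]
      simp [List.getD_eq_getElem?_getD, List.getElem?_eq_getElem hmL]
    have harr2 : (List.range' (m + 1) (nb.length - (m + 1))).foldl
        (fun a k => a ++ [nb.getD k 0]) [] = nb.drop (m + 1) := by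
      rw [pv_foldl_append_map, List.nil_append, pv_range'_getD_drop nb (m + 1) (by omega)]
    simp only [harr1, harr2, pv_foldl_range_getD_sum, List.map_append,
      List.map_cons, List.map_nil, zero_add, Prod.mk.injEq]
    refine ⟨trivial, ?_⟩
    congr 1
    unfold pvG
    congr 1
    by_cases h : (nb.take (m + 1)).sum ≤ (nb.drop (m + 1)).sum
    · rw [if_neg (by omega), max_eq_right h]
    · rw [if_pos (by omega), max_eq_left (by omega)]

lemma pv_A_eq_min_pvM (n : Int) (nb : List Int) (ns : Int) :
    Min_pages n nb ns = (PySem.List.min? (pvM nb) (fun x => x)).getD 0 := by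
  show (PySem.List.min? _ (fun x => x)).getD 0 = _
  rw [pv_A_inv nb (nb.length - 1) (le_refl _)]
  rfl

-- the per-split values B generates, in order
def pvMvals (total : Int) : Int → List Int → List Int
  | _, [] => []
  | p, x :: t => max (p + x) (total - (p + x)) :: pvMvals total (p + x) t

def pvComb (b : Option Int) (m : Int) : Option Int :=
  match b with
  | none => some m
  | some v => if m < v then some m else some v

lemma pv_B_fold (total : Int) : ∀ (ys : List Int) (p : Int) (b : Option Int),
    ys.foldl
      (fun (st : Option Int × Int) (x : Int) =>
        let pref := st.2 + x
        let m := max pref (total - pref)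
        ((match st.1 with
          | none => some m
          | some v => if m < v then some m else some v), pref))
      (b, p)
    = ((pvMvals total p ys).foldl pvComb b, p + ys.sum) := by
  intro ys
  induction ys with
  | nil => intro p b; simp [pvMvals]
  | cons x t ih =>
    intro p b
    rw [List.foldl_cons, ih]
    simp [pvMvals, pvComb, List.foldl_cons]
    ring

lemma pv_comb_some (t : List Int) : ∀ b : Int, t.foldl pvComb (some b) = some (t.foldl min b) := by
  induction t with
  | nil => intro b; simp
  | cons y s ih =>
    intro b
    rw [List.foldl_cons, List.foldl_cons]
    have : pvComb (some b) y = some (min b y) := by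
      show (if y < b then some y else some b) = some (min b y)
      split_ifs with h
      · rw [min_eq_right (le_of_lt h)]
      · rw [min_eq_left (by omega)]
    rw [this, ih]

lemma pv_comb_min? (xs : List Int) :
    xs.foldl pvComb none = PySem.List.min? xs (fun x => x) := by
  cases xs with
  | nil => exact ((PySem.List.min?_eq_none_iff ([] : List Int) (fun x => x)).mpr rfl).symm
  | cons x t =>
    rw [List.foldl_cons, PySem.List.min?_id_cons]
    show t.foldl pvComb (some x) = _
    rw [pv_comb_some]

lemma pv_mvals_map (total : Int) : ∀ (ys : List Int) (p : Int),
    pvMvals total p ys = (List.range ys.length).map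
      (fun i => max (p + (ys.take (i + 1)).sum) (total - (p + (ys.take (i + 1)).sum))) := by
  intro ys
  induction ys with
  | nil => intro p; simp [pvMvals]
  | cons x t ih =>
    intro p
    rw [pvMvals, ih (p + x)]
    simp only [List.length_cons, List.range_succ_eq_map, List.map_cons, List.map_map]
    congr 1
    · simp
    · apply List.map_congr_left
      intro i _
      show max ((p + x) + (t.take (i + 1)).sum) (total - ((p + x) + (t.take (i + 1)).sum))
          = max (p + ((x :: t).take (i + 1 + 1)).sum) (total - (p + ((x :: t).take (i + 1 + 1)).sum))
      rw [List.take_succ_cons, List.sum_cons]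
      congr 1 <;> ring

lemma pv_B_eq_min_pvM (n : Int) (nb : List Int) (ns : Int) :
    Min_pages_alt n nb ns = (PySem.List.min? (pvM nb) (fun x => x)).getD 0 := by
  show ((nb.dropLast.foldl _ ((none : Option Int), (0 : Int))).1).getD 0 = _
  rw [pv_B_fold]
  simp only []
  have hM : pvMvals (nb.foldl (· + ·) 0) 0 nb.dropLast = pvM nb := by
    rw [pv_foldl_sum, pv_mvals_map]
    unfold pvM
    rw [List.length_dropLast]
    apply List.map_congr_left
    intro i hi
    have hi' : i < nb.length - 1 := List.mem_range.mp hi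
    have htake : nb.dropLast.take (i + 1) = nb.take (i + 1) := by
      rw [List.dropLast_eq_take, List.take_take]
      congr 1
      omega
    have hsum : (nb.take (i + 1)).sum + (nb.drop (i + 1)).sum = nb.sum := by
      rw [← List.sum_append, List.take_append_drop]
    unfold pvG
    rw [htake, zero_add]
    congr 1
    linarith [hsum]
  rw [hM, pv_comb_min?]

-- ===== VERDICT (by name: the statement is the Claim_ definition above) =====
theorem Min_pages_spec : Claim_equal_Min_pages := by
  intro n nb ns _ _
  unfold Spec_Min_pages
  rw [pv_A_eq_min_pvM, pv_B_eq_min_pvM]
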